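-- pv_equiv track=rewrite | github.com/aryanmangal769/Optimised_bankers_algorithm | Banker's Algorithm_optimised.py | radiax_sort
-- ===== SOURCE A (Python) =====
-- import math
--
-- def count_sort(a,n,pos,idx):
--     div = pow (10, pos)
--     freq = [0] *10
--     position = [0] *10
--
--     for i in range(n):
--         x = (a[idx[i]] // div) % 10
--         freq[x] += 1
--
--     final = [0] *(n)
--
--     position[0] = 0
--     for i in range (1,10):
--         position[i] = position[i - 1] + freq[i - 1]
--
--     for i in range(n):
--         final[position[(a[idx[i]] // div) % 10]] = idx[i]
--         position[(a[idx[i]] // div) % 10] += 1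
--
--     for i in range(n):
--         idx[i] = final[i]
--
-- def radiax_sort(a, n):
--     maxele = 1
--     for i in range(n):
--         maxele = max(maxele, a[i])
--
--     maxdig = (int)(math.log10(maxele))
--     idx = [0] *(n)
--     for i in range(n):
--         idx[i] = i
--
--     for i in range(maxdig+1):
--         count_sort (a, n, i, idx)
--
--     return idx
-- ===== SOURCE B (Python) =====
-- import math
--
-- def radiax_sort(a, n):
--     # One stable comparison sort by the last `width` decimal digits (all the
--     # digits the radix passes inspect), instead of digit-by-digit counting passes.
--     maxele = max([1] + [a[i] for i in range(n)])
--     width = int(math.log10(maxele)) + 1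
--     mod = 10 ** width
--     return sorted(range(n), key=lambda i: a[i] % mod)
-- ===== Notes on version B (the rewrite author's own statement) =====
-- stated objective: faster
-- what changed: Replaces the per-digit LSD counting-sort passes (frequency array, prefix sums, scatter, copy-back per digit) with one stable comparison sort of the indices keyed by a[i] % 10**width, where width is the number of digit passes A performs; stability reproduces A's tie order exactly.
import Mathlib
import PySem

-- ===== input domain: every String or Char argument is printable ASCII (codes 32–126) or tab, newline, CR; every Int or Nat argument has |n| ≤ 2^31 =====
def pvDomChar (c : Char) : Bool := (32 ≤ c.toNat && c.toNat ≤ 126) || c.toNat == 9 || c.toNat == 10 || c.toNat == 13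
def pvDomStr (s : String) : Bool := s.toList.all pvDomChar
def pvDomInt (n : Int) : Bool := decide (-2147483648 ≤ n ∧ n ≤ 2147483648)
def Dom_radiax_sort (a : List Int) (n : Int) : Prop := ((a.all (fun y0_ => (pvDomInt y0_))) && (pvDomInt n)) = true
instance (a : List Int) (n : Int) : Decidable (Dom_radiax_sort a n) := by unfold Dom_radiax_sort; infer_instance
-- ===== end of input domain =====

-- B replaces the digit-by-digit LSD counting-sort passes with ONE stable comparison sort of the
-- indices keyed by a[i] % 10**width (width = the number of digit passes A performs); same return value.

-- int(math.log10(m)) for m ≥ 1: exact on this domain (|int| ≤ 2^31). Fuel = m (structural recursion).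
def pyLog10Aux : Nat → Nat → Nat
  | 0, _ => 0
  | fuel + 1, m => if m < 10 then 0 else pyLog10Aux fuel (m / 10) + 1

def pyLog10 (m : Nat) : Nat := pyLog10Aux m m

def pvKey (a : List Int) (div : Int) (j : Int) : Int :=
  PySem.Int.mod (PySem.Int.floordiv (PySem.List.pyGetD a j 0) div) 10

-- "for i in range(n): x = (a[idx[i]] // div) % 10; freq[x] += 1"

def countSortFreq (a : List Int) (n : Int) (div : Int) (idx : List Int) : List Int :=
  (PySem.List.pyRange 0 n 1).foldl
    (fun freq i =>
      let x := pvKey a div (PySem.List.pyGetD idx i 0)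
      freq.set x.toNat (freq.getD x.toNat 0 + 1))
    (List.replicate 10 0)

-- "position[0] = 0; for i in range(1,10): position[i] = position[i-1] + freq[i-1]"

def countSortPosition (freq : List Int) : List Int :=
  (PySem.List.pyRange 1 10 1).foldl
    (fun position i => position.set i.toNat (position.getD (i.toNat - 1) 0 + freq.getD (i.toNat - 1) 0))
    ((List.replicate 10 0).set 0 0)

-- "final = [0]*n; for i in range(n): final[position[x]] = idx[i]; position[x] += 1"

def countSortPlace (a : List Int) (n : Int) (div : Int) (idx : List Int) (position : List Int) : List Int × List Int :=
  (PySem.List.pyRange 0 n 1).foldl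
    (fun (s : List Int × List Int) i =>
      let x := pvKey a div (PySem.List.pyGetD idx i 0)
      (s.1.set (s.2.getD x.toNat 0).toNat (PySem.List.pyGetD idx i 0),
       s.2.set x.toNat (s.2.getD x.toNat 0 + 1)))
    (List.replicate n.toNat 0, position)

def countSort (a : List Int) (n : Int) (pos : Int) (idx : List Int) : List Int :=
  let div : Int := 10 ^ pos.toNat
  let fp := countSortPlace a n div idx (countSortPosition (countSortFreq a n div idx))
  (PySem.List.pyRange 0 n 1).foldl (fun idx i => idx.set i.toNat (fp.1.getD i.toNat 0)) idx

def radiax_sort (a : List Int) (n : Int) : List Int :=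
  let maxele : Int := (PySem.List.pyRange 0 n 1).foldl
    (fun m i => max m (PySem.List.pyGetD a i 0)) 1
  let maxdig : Nat := pyLog10 maxele.toNat
  let idx0 : List Int := (PySem.List.pyRange 0 n 1).foldl
    (fun idx i => idx.set i.toNat i) (List.replicate n.toNat 0)
  (PySem.List.pyRange 0 ((maxdig : Int) + 1) 1).foldl (fun idx p => countSort a n p idx) idx0

def radiax_sort_alt (a : List Int) (n : Int) : List Int :=
  let maxele : Int := (PySem.List.max?
    (1 :: (PySem.List.pyRange 0 n 1).map (fun i => PySem.List.pyGetD a i 0))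
    (fun y => y)).getD 1
  let width : Nat := pyLog10 maxele.toNat + 1
  let m : Int := 10 ^ width
  PySem.List.sorted (PySem.List.pyRange 0 n 1)
    (fun i => PySem.Int.mod (PySem.List.pyGetD a i 0) m) false

-- ===== PRECONDITION & SPEC =====
-- Pre_ excludes exactly the inputs where the Python A raises IndexError (n > len(a)); B raises there too.
def Pre_radiax_sort (a : List Int) (n : Int) : Prop := n ≤ (a.length : Int)
instance (a : List Int) (n : Int) : Decidable (Pre_radiax_sort a n) := by unfold Pre_radiax_sort; infer_instance
def pvWitness_radiax_sort : List Int × Int := ([102, 7, 41, 7, 0], 5)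
def Spec_radiax_sort (a : List Int) (n : Int) (out : List Int) : Prop := out = radiax_sort_alt a n
instance (a : List Int) (n : Int) (out : List Int) : Decidable (Spec_radiax_sort a n out) := by unfold Spec_radiax_sort; infer_instance

-- ===== CLAIM (what is proved, stated in full; the proofs are below) =====
def Claim_equal_radiax_sort : Prop := ∀ (a : List Int) (n : Int), Dom_radiax_sort a n → Pre_radiax_sort a n → Spec_radiax_sort a n (radiax_sort a n)

-- ===== LEMMAS AND PROOFS =====

-- digit/mod split: x % (10*M) = M * ((x // M) % 10) + x % M  (Python floor semantics, any x)
theorem pv_mod_split (x M : Int) (hM : 0 < M) :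
    PySem.Int.mod x (10 * M) = M * (PySem.Int.mod (PySem.Int.floordiv x M) 10) + PySem.Int.mod x M := by
  rw [PySem.Int.mod_eq_emod_of_pos (by positivity), PySem.Int.mod_eq_emod_of_pos (by norm_num),
      PySem.Int.mod_eq_emod_of_pos hM, PySem.Int.floordiv_eq_ediv_of_pos hM]
  have h1 : x / M / 10 = x / (10 * M) := by
    rw [Int.ediv_ediv_eq_ediv_mul (le_of_lt hM), mul_comm]
  have e1 := Int.ediv_add_emod x M
  have e2 := Int.ediv_add_emod (x / M) 10
  have e3 := Int.ediv_add_emod x (10 * M)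
  rw [h1] at e2
  nlinarith [e1, e2, e3]

theorem pv_mod_eq_iff (x M d v : Int) (hM : 0 < M) (hd0 : 0 ≤ d) (hd : d < 10) (hv0 : 0 ≤ v) (hv : v < M) :
    (PySem.Int.mod x (10 * M) = d * M + v) ↔
      (PySem.Int.mod (PySem.Int.floordiv x M) 10 = d ∧ PySem.Int.mod x M = v) := by
  have hs := pv_mod_split x M hM
  set D := PySem.Int.mod (PySem.Int.floordiv x M) 10 with hD
  set R := PySem.Int.mod x M with hR
  have hD0 : 0 ≤ D := PySem.Int.mod_nonneg _ (by norm_num)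
  have hD10 : D < 10 := PySem.Int.mod_lt _ (by norm_num)
  have hR0 : 0 ≤ R := PySem.Int.mod_nonneg _ hM
  have hRM : R < M := PySem.Int.mod_lt _ hM
  constructor
  · intro h
    rw [hs] at h
    have key : M * (D - d) = v - R := by linarith
    have hDd : D = d := by nlinarith
    constructor
    · exact hDd
    · rw [hDd] at key; nlinarith
  · rintro ⟨h1, h2⟩
    rw [hs, h1, h2]; ring

-- insertBy passes over a block in which no comparison fires
theorem pv_insertBy_append_left (before : Int → Int → Bool) (x : Int) (l1 l2 : List Int)
    (h : ∀ y ∈ l1, before x y = false) :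
    PySem.List.insertBy before x (l1 ++ l2) = l1 ++ PySem.List.insertBy before x l2 := by
  induction l1 with
  | nil => simp
  | cons y ys ih =>
    simp only [List.cons_append, PySem.List.insertBy, h y (by simp)]
    simp only [Bool.false_eq_true, if_false, List.cons.injEq, true_and]
    exact ih (fun z hz => h z (by simp [hz]))

theorem pv_insertBy_all_before (before : Int → Int → Bool) (x : Int) (l : List Int)
    (h : ∀ y ∈ l, before x y = true) :
    PySem.List.insertBy before x l = x :: l := by
  cases l with
  | nil => rfl
  | cons y ys => simp [PySem.List.insertBy, h y (by simp)]

-- one insertion into a concatenation of key-buckets lands at the end of its own bucket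
theorem pv_insertBy_buckets (key : Int → Int) (x : Int) (t : List Int) :
    ∀ ds : List Int, ds.Pairwise (· < ·) → key x ∈ ds →
    PySem.List.insertBy (fun a b => decide (key a < key b)) x
        (ds.flatMap (fun d => t.filter (fun j => key j == d)))
      = ds.flatMap (fun d => (t ++ [x]).filter (fun j => key j == d)) := by
  intro ds
  induction ds with
  | nil => intro _ h; simp at h
  | cons d ds' ih =>
    intro hpw hmem
    have hpw' := (List.pairwise_cons.mp hpw).2
    have hdlt := (List.pairwise_cons.mp hpw).1
    simp only [List.flatMap_cons]
    by_cases hx : key x = d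
    · -- x belongs to this first bucket
      have hblock : ∀ y ∈ t.filter (fun j => key j == d), (fun a b => decide (key a < key b)) x y = false := by
        intro y hy
        have : key y = d := by simpa using (List.of_mem_filter hy)
        simp [this, hx]
      rw [pv_insertBy_append_left _ _ _ _ hblock]
      have hrest : ∀ y ∈ ds'.flatMap (fun e => t.filter (fun j => key j == e)),
          (fun a b => decide (key a < key b)) x y = true := by
        intro y hy
        rcases List.mem_flatMap.mp hy with ⟨e, he, hyf⟩
        have : key y = e := by simpa using (List.of_mem_filter hyf)
        have : key x < key y := by rw [this, hx]; exact hdlt e he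
        simpa using this
      rw [pv_insertBy_all_before _ _ _ hrest]
      have hb1 : (t ++ [x]).filter (fun j => key j == d) = t.filter (fun j => key j == d) ++ [x] := by
        rw [List.filter_append]; simp [hx]
      have hb2 : ds'.flatMap (fun e => (t ++ [x]).filter (fun j => key j == e))
          = ds'.flatMap (fun e => t.filter (fun j => key j == e)) := by
        apply List.flatMap_congr
        intro e he
        rw [List.filter_append]
        have : key x ≠ e := by rw [hx]; exact ne_of_lt (hdlt e he)
        simp [this]
      rw [hb1, hb2]; simp
    · -- x belongs to a later bucket
      have hmem' : key x ∈ ds' := by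
        rcases List.mem_cons.mp hmem with h | h
        · exact absurd h hx
        · exact h
      have hgt : d < key x := hdlt _ hmem'
      have hblock : ∀ y ∈ t.filter (fun j => key j == d), (fun a b => decide (key a < key b)) x y = false := by
        intro y hy
        have : key y = d := by simpa using (List.of_mem_filter hy)
        simp [this]; omega
      rw [pv_insertBy_append_left _ _ _ _ hblock, ih hpw' hmem']
      have hb1 : (t ++ [x]).filter (fun j => key j == d) = t.filter (fun j => key j == d) := by
        rw [List.filter_append]; simp [hx]
      rw [hb1]

-- stable insertion sort = bucket concatenation over any strictly increasing covering key list
theorem pv_sorted_eq_buckets (key : Int → Int) (ds : List Int) (hpw : ds.Pairwise (· < ·)) :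
    ∀ xs : List Int, (∀ x ∈ xs, key x ∈ ds) →
    PySem.List.sorted xs key false = ds.flatMap (fun d => xs.filter (fun j => key j == d)) := by
  intro xs
  induction xs using List.reverseRecOn with
  | nil => intro _; simp [PySem.List.sorted_eq_foldl_insertBy]
  | append_singleton t x ih =>
    intro hcov
    rw [PySem.List.sorted_eq_foldl_insertBy, List.foldl_append, List.foldl_cons, List.foldl_nil,
        ← PySem.List.sorted_eq_foldl_insertBy, ih (fun y hy => hcov y (by simp [hy]))]
    exact pv_insertBy_buckets key x t ds hpw (hcov x (by simp))

def pvDs10 : List Int := PySem.List.pyRange 0 10 1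

def pvChunk (k : Int → Int) (tot : Int → Nat) (t : List Int) (d : Int) : List Int :=
  t.filter (fun j => k j == d) ++ List.replicate (tot d - t.countP (fun j => k j == d)) 0

def pvChunks (k : Int → Int) (tot : Int → Nat) (t : List Int) (ds : List Int) : List Int :=
  ds.flatMap (pvChunk k tot t)

def pvOff (tot : Int → Nat) (v : Int) (ds : List Int) : Nat :=
  ((ds.takeWhile (fun d => !(d == v))).map tot).sum

def pvPos (k : Int → Int) (tot : Int → Nat) (t : List Int) : List Int :=
  pvDs10.map (fun d => ((pvOff tot d pvDs10 : Nat) : Int) + ((t.countP (fun x => k x == d) : Nat) : Int))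

-- sum of per-key counts over a nodup covering key list is the length
theorem pv_sum_countP (k : Int → Int) (ds : List Int) (hnd : ds.Nodup) :
    ∀ t : List Int, (∀ x ∈ t, k x ∈ ds) →
      ((ds.map (fun d => t.countP (fun x => k x == d))).sum) = t.length := by
  intro t
  induction t with
  | nil => intro _; simp
  | cons x t ih =>
    intro hcov
    have h1 : ∀ d, (x :: t).countP (fun y => k y == d) = t.countP (fun y => k y == d) + (if k x == d then 1 else 0) := by
      intro d; rw [List.countP_cons]
    have : (ds.map (fun d => (x :: t).countP (fun y => k y == d))).sum
        = (ds.map (fun d => t.countP (fun y => k y == d))).sum + (ds.map (fun d => if k x == d then 1 else 0)).sum := by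
      simp only [h1]
      rw [← List.sum_map_add]
    rw [this, ih (fun y hy => hcov y (by simp [hy]))]
    have hcount1 : (ds.map (fun d => if k x == d then 1 else 0)).sum = ds.countP (fun d => k x == d) := by
      clear hnd hcov ih h1 this
      induction ds with
      | nil => simp
      | cons d ds ihd =>
        simp only [List.map_cons, List.sum_cons, List.countP_cons, ihd]
        by_cases h : (k x == d) <;> simp [h] <;> omega
    have hcount2 : ds.countP (fun d => k x == d) = ds.count (k x) := by
      rw [List.count]; exact List.countP_congr (fun d _ => by rw [Bool.beq_comm])
    rw [hcount1, hcount2, List.count_eq_one_of_mem hnd (hcov x (by simp))]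
    simp [Nat.add_comm]

theorem pv_chunk_length (k : Int → Int) (tot : Int → Nat) (t : List Int) (d : Int)
    (h : t.countP (fun j => k j == d) ≤ tot d) : (pvChunk k tot t d).length = tot d := by
  simp [pvChunk, ← List.countP_eq_length_filter]
  omega

theorem pv_chunk_unchanged (k : Int → Int) (tot : Int → Nat) (t : List Int) (j d : Int)
    (h : k j ≠ d) : pvChunk k tot (t ++ [j]) d = pvChunk k tot t d := by
  simp [pvChunk, List.filter_append, List.countP_append, h]

theorem pv_set_boundary (xs zs : List Int) (j : Int) :
    (xs ++ (0 : Int) :: zs).set xs.length j = xs ++ j :: zs := by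
  rw [List.set_append]
  simp

-- placing one element at (offset of its bucket) + (its bucket's current fill) extends that bucket
theorem pv_chunks_set (k : Int → Int) (tot : Int → Nat) (t : List Int) (j : Int) :
    ∀ ds : List Int, ds.Nodup → k j ∈ ds →
      t.countP (fun x => k x == k j) < tot (k j) →
      (∀ d ∈ ds, t.countP (fun x => k x == d) ≤ tot d) →
      (pvChunks k tot t ds).set (pvOff tot (k j) ds + t.countP (fun x => k x == k j)) j
        = pvChunks k tot (t ++ [j]) ds := by
  intro ds
  induction ds with
  | nil => intro _ h; simp at h
  | cons d ds' ih =>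
    intro hnd hmem hlt hle
    have hnd' := (List.nodup_cons.mp hnd).2
    have hdn := (List.nodup_cons.mp hnd).1
    have hsplit : ∀ u : List Int, pvChunks k tot u (d :: ds') = pvChunk k tot u d ++ pvChunks k tot u ds' := by
      intro u; simp [pvChunks]
    rw [hsplit, hsplit]
    by_cases hx : k j = d
    · -- first bucket is j's bucket
      have hoff : pvOff tot (k j) (d :: ds') = 0 := by
        simp [pvOff, List.takeWhile, hx]
      have h1 : (t ++ [j]).countP (fun x => k x == d) = t.countP (fun x => k x == d) + 1 := by
        simp [List.countP_append, hx]
      have hltd : t.countP (fun x => k x == d) < tot d := by rw [← hx]; exact hlt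
      have hchunk : pvChunk k tot t d
          = t.filter (fun x => k x == d) ++ (0 :: List.replicate (tot d - (t ++ [j]).countP (fun x => k x == d)) 0) := by
        rw [pvChunk]
        congr 1
        have h2 : tot d - t.countP (fun x => k x == d)
            = (tot d - (t ++ [j]).countP (fun x => k x == d)) + 1 := by omega
        rw [h2, List.replicate_succ]
      have hcnt : t.countP (fun x => k x == k j) = (t.filter (fun x => k x == d)).length := by
        rw [← List.countP_eq_length_filter, hx]
      have hset : (pvChunk k tot t d).set (t.countP (fun x => k x == k j)) j = pvChunk k tot (t ++ [j]) d := by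
        rw [hchunk, hcnt, pv_set_boundary]
        simp [pvChunk, List.filter_append, hx, h1]
      have hlen : (pvChunk k tot t d).length = tot d := pv_chunk_length k tot t d (hle d (by simp))
      have hb2 : pvChunks k tot (t ++ [j]) ds' = pvChunks k tot t ds' := by
        apply List.flatMap_congr
        intro e he
        exact pv_chunk_unchanged k tot t j e (by rw [hx]; rintro rfl; exact hdn he)
      rw [hoff, Nat.zero_add, List.set_append, if_pos (by rw [hlen, ← hx]; exact hlt), hset, hb2]
    · -- j's bucket is further right
      have hmem' : k j ∈ ds' := by
        rcases List.mem_cons.mp hmem with h | h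
        · exact absurd h hx
        · exact h
      have hoff : pvOff tot (k j) (d :: ds') = tot d + pvOff tot (k j) ds' := by
        have hne : (d == k j) = false := by simp; rintro rfl; exact hx rfl
        simp [pvOff, List.takeWhile, hne]
      have hlen : (pvChunk k tot t d).length = tot d := pv_chunk_length k tot t d (hle d (by simp))
      rw [hoff, List.set_append]
      have hge : ¬ (tot d + pvOff tot (k j) ds' + t.countP (fun x => k x == k j) < (pvChunk k tot t d).length) := by
        rw [hlen]; omega
      rw [if_neg hge, hlen]
      have hidx : tot d + pvOff tot (k j) ds' + t.countP (fun x => k x == k j) - tot d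
          = pvOff tot (k j) ds' + t.countP (fun x => k x == k j) := by omega
      rw [hidx, ih hnd' hmem' hlt (fun e he => hle e (by simp [he])),
          pv_chunk_unchanged k tot t j d hx]

theorem pv_chunks_nil (k : Int → Int) (tot : Int → Nat) (ds : List Int) :
    pvChunks k tot [] ds = List.replicate ((ds.map tot).sum) 0 := by
  induction ds with
  | nil => simp [pvChunks]
  | cons d ds' ih =>
    simp only [pvChunks, List.flatMap_cons, List.map_cons, List.sum_cons] at *
    rw [ih, pvChunk]
    simp only [List.filter_nil, List.countP_nil, Nat.sub_zero, List.nil_append]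
    rw [List.replicate_add]

theorem pv_chunks_full (k : Int → Int) (t : List Int) (ds : List Int) :
    pvChunks k (fun d => t.countP (fun x => k x == d)) t ds
      = ds.flatMap (fun d => t.filter (fun x => k x == d)) := by
  apply List.flatMap_congr
  intro d _
  simp [pvChunk]

-- getD / set on a list built as a map over pyRange 0 10
theorem pv_map_ds10_getD (f : Int → Int) (m : Int) (h0 : 0 ≤ m) (h10 : m < 10) :
    (pvDs10.map f).getD m.toNat 0 = f m := by
  have hlen : (pvDs10.map f).length = 10 := by simp [pvDs10]
  have hm : m.toNat < 10 := by omega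
  rw [List.getD_eq_getElem _ _ (by rw [hlen]; exact hm)]
  rw [List.getElem_map]
  simp only [pvDs10]
  rw [PySem.List.getElem_pyRange_one]
  congr 1
  omega

theorem pv_map_ds10_set (f : Int → Int) (m : Int) (v : Int) (h0 : 0 ≤ m) (h10 : m < 10) :
    (pvDs10.map f).set m.toNat v = pvDs10.map (fun d => if d = m then v else f d) := by
  apply List.ext_getElem
  · simp
  · intro i hi hi'
    have hi10 : i < 10 := by simpa [pvDs10] using hi'
    simp only [pvDs10] at *
    rw [List.getElem_set, List.getElem_map, List.getElem_map,
        PySem.List.getElem_pyRange_one]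
    by_cases h : m.toNat = i
    · rw [if_pos h, if_pos (by omega)]
    · rw [if_neg h, if_neg (by omega)]

theorem pv_pos_getD (k : Int → Int) (tot : Int → Nat) (t : List Int) (m : Int)
    (h0 : 0 ≤ m) (h10 : m < 10) :
    (pvPos k tot t).getD m.toNat 0
      = ((pvOff tot m pvDs10 : Nat) : Int) + ((t.countP (fun x => k x == m) : Nat) : Int) := by
  exact pv_map_ds10_getD (fun d => ((pvOff tot d pvDs10 : Nat) : Int) + ((t.countP (fun x => k x == d) : Nat) : Int)) m h0 h10

theorem pv_pos_step (k : Int → Int) (tot : Int → Nat) (t : List Int) (j : Int)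
    (h0 : 0 ≤ k j) (h10 : k j < 10) :
    (pvPos k tot t).set (k j).toNat ((pvPos k tot t).getD (k j).toNat 0 + 1)
      = pvPos k tot (t ++ [j]) := by
  rw [pv_pos_getD k tot t (k j) h0 h10]
  rw [pvPos, pv_map_ds10_set _ _ _ h0 h10]
  apply List.map_congr_left
  intro d _
  by_cases h : d = k j
  · rw [if_pos h, h]
    have : (t ++ [j]).countP (fun x => k x == k j) = t.countP (fun x => k x == k j) + 1 := by
      simp [List.countP_append]
    rw [this]
    push_cast
    ring
  · rw [if_neg h]
    have : (t ++ [j]).countP (fun x => k x == d) = t.countP (fun x => k x == d) := by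
      simp [List.countP_append]
      rintro rfl; exact h rfl
    rw [this]

theorem pv_scatter (k : Int → Int) (hk : ∀ j, 0 ≤ k j ∧ k j < 10) (tot : Int → Nat) :
    ∀ (r t : List Int), (∀ d, (t ++ r).countP (fun x => k x == d) ≤ tot d) →
      r.foldl (fun (s : List Int × List Int) j =>
          (s.1.set ((s.2.getD (k j).toNat 0).toNat) j, s.2.set (k j).toNat (s.2.getD (k j).toNat 0 + 1)))
        (pvChunks k tot t pvDs10, pvPos k tot t)
      = (pvChunks k tot (t ++ r) pvDs10, pvPos k tot (t ++ r)) := by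
  intro r
  induction r with
  | nil => intro t _; simp
  | cons j r' ih =>
    intro t hle
    rw [List.foldl_cons]
    have hcnt1 : (j :: r').countP (fun x => k x == k j) ≥ 1 := by
      rw [List.countP_cons]
      simp
    have hlt : t.countP (fun x => k x == k j) < tot (k j) := by
      have := hle (k j)
      rw [List.countP_append] at this
      omega
    have hled : ∀ d ∈ pvDs10, t.countP (fun x => k x == d) ≤ tot d := by
      intro d _
      have := hle d
      rw [List.countP_append] at this
      omega
    have hmem : k j ∈ pvDs10 := by
      rw [pvDs10, PySem.List.mem_pyRange_one]
      exact ⟨(hk j).1, (hk j).2⟩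
    have hnd : pvDs10.Nodup := by rw [pvDs10]; exact PySem.List.nodup_pyRange_one 0 10
    have hgd : (pvPos k tot t).getD (k j).toNat 0
        = ((pvOff tot (k j) pvDs10 : Nat) : Int) + ((t.countP (fun x => k x == k j) : Nat) : Int) :=
      pv_pos_getD k tot t (k j) (hk j).1 (hk j).2
    have htn : ((pvPos k tot t).getD (k j).toNat 0).toNat
        = pvOff tot (k j) pvDs10 + t.countP (fun x => k x == k j) := by
      rw [hgd, ← Nat.cast_add, Int.toNat_natCast]
    have hfst : (pvChunks k tot t pvDs10).set (((pvPos k tot t).getD (k j).toNat 0).toNat) j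
        = pvChunks k tot (t ++ [j]) pvDs10 := by
      rw [htn]
      exact pv_chunks_set k tot t j pvDs10 hnd hmem hlt hled
    have hsnd := pv_pos_step k tot t j (hk j).1 (hk j).2
    simp only [hfst, hsnd]
    have := ih (t ++ [j]) (by intro d; rw [List.append_assoc]; simpa [List.countP_append] using hle d)
    rw [this, List.append_assoc]
    rfl

theorem pv_getD_set_self (f : List Int) (m : Nat) (v : Int) (h : m < f.length) :
    (f.set m v).getD m 0 = v := by
  rw [List.getD_eq_getElem _ _ (by simpa using h), List.getElem_set, if_pos rfl]

theorem pv_getD_set_ne (f : List Int) (m i : Nat) (v : Int) (h : m ≠ i) :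
    (f.set m v).getD i 0 = f.getD i 0 := by
  by_cases hi : i < f.length
  · rw [List.getD_eq_getElem _ _ (by simpa using hi), List.getD_eq_getElem _ _ hi,
        List.getElem_set, if_neg h]
  · rw [List.getD_eq_default _ _ (by simpa using Nat.le_of_not_lt hi),
        List.getD_eq_default _ _ (Nat.le_of_not_lt hi)]

theorem pv_freq (k : Int → Int) (hk : ∀ j, 0 ≤ k j ∧ k j < 10) :
    ∀ (t : List Int) (f : List Int), f.length = 10 →
      (t.foldl (fun f j => f.set (k j).toNat (f.getD (k j).toNat 0 + 1)) f).length = 10 ∧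
      ∀ d : Nat, d < 10 →
        (t.foldl (fun f j => f.set (k j).toNat (f.getD (k j).toNat 0 + 1)) f).getD d 0
          = f.getD d 0 + (t.countP (fun x => k x == (d : Int)) : Int) := by
  intro t
  induction t with
  | nil => intro f hf; exact ⟨hf, fun d _ => by simp⟩
  | cons j t ih =>
    intro f hf
    rw [List.foldl_cons]
    have hf' : (f.set (k j).toNat (f.getD (k j).toNat 0 + 1)).length = 10 := by
      rw [List.length_set]; exact hf
    refine ⟨(ih _ hf').1, ?_⟩
    intro d hd
    rw [(ih _ hf').2 d hd, List.countP_cons]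
    by_cases h : k j = (d : Int)
    · have ht : (k j).toNat = d := by omega
      rw [ht, pv_getD_set_self f _ _ (by rw [hf]; omega)]
      simp [h]
      push_cast
      ring
    · have ht : (k j).toNat ≠ d := by
        have := (hk j).1
        omega
      rw [pv_getD_set_ne f _ _ _ ht]
      have : (k j == (d : Int)) = false := by simp [h]
      rw [this]
      simp
theorem pv_position_crunch (k : Int → Int) (tot : Int → Nat) (freq : List Int)
    (hg : ∀ d : Nat, d < 10 → freq.getD d 0 = (tot d : Int)) :
    (PySem.List.pyRange 1 10 1).foldl
      (fun position i => position.set i.toNat (position.getD (i.toNat - 1) 0 + freq.getD (i.toNat - 1) 0))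
      ((List.replicate 10 (0:Int)).set 0 0)
    = pvPos k tot [] := by
  have h9 : PySem.List.pyRange 1 10 1 = [1,2,3,4,5,6,7,8,9] := by decide
  rw [h9]
  have hL : ([1,2,3,4,5,6,7,8,9] : List Int).foldl
      (fun position i => position.set i.toNat (position.getD (i.toNat - 1) 0 + freq.getD (i.toNat - 1) 0))
      ((List.replicate 10 (0:Int)).set 0 0)
    = [0, 0 + freq.getD 0 0,
        0 + freq.getD 0 0 + freq.getD 1 0,
        0 + freq.getD 0 0 + freq.getD 1 0 + freq.getD 2 0,
        0 + freq.getD 0 0 + freq.getD 1 0 + freq.getD 2 0 + freq.getD 3 0,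
        0 + freq.getD 0 0 + freq.getD 1 0 + freq.getD 2 0 + freq.getD 3 0 + freq.getD 4 0,
        0 + freq.getD 0 0 + freq.getD 1 0 + freq.getD 2 0 + freq.getD 3 0 + freq.getD 4 0 + freq.getD 5 0,
        0 + freq.getD 0 0 + freq.getD 1 0 + freq.getD 2 0 + freq.getD 3 0 + freq.getD 4 0 + freq.getD 5 0 + freq.getD 6 0,
        0 + freq.getD 0 0 + freq.getD 1 0 + freq.getD 2 0 + freq.getD 3 0 + freq.getD 4 0 + freq.getD 5 0 + freq.getD 6 0 + freq.getD 7 0,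
        0 + freq.getD 0 0 + freq.getD 1 0 + freq.getD 2 0 + freq.getD 3 0 + freq.getD 4 0 + freq.getD 5 0 + freq.getD 6 0 + freq.getD 7 0 + freq.getD 8 0] := rfl
  rw [hL, hg 0 (by norm_num), hg 1 (by norm_num), hg 2 (by norm_num), hg 3 (by norm_num),
      hg 4 (by norm_num), hg 5 (by norm_num), hg 6 (by norm_num), hg 7 (by norm_num), hg 8 (by norm_num)]
  have hR : pvPos k tot []
    = [((0:Nat) : Int),
       (((tot 0 : Nat) : Int)),
       (((tot 0 + tot 1 : Nat) : Int)),
       (((tot 0 + tot 1 + tot 2 : Nat) : Int)),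
       (((tot 0 + tot 1 + tot 2 + tot 3 : Nat) : Int)),
       (((tot 0 + tot 1 + tot 2 + tot 3 + tot 4 : Nat) : Int)),
       (((tot 0 + tot 1 + tot 2 + tot 3 + tot 4 + tot 5 : Nat) : Int)),
       (((tot 0 + tot 1 + tot 2 + tot 3 + tot 4 + tot 5 + tot 6 : Nat) : Int)),
       (((tot 0 + tot 1 + tot 2 + tot 3 + tot 4 + tot 5 + tot 6 + tot 7 : Nat) : Int)),
       (((tot 0 + tot 1 + tot 2 + tot 3 + tot 4 + tot 5 + tot 6 + tot 7 + tot 8 : Nat) : Int))] := by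
    have hds : pvDs10 = [0,1,2,3,4,5,6,7,8,9] := by decide
    simp [pvPos, hds, pvOff, List.takeWhile]
    and_intros <;> (push_cast; try ring)
  rw [hR]
  simp only [List.cons.injEq, and_true]
  and_intros <;> (push_cast; try ring)

theorem pv_foldl_set_range (f : Nat → Int) :
    ∀ (m : Nat) (xs : List Int), m ≤ xs.length →
      (List.range m).foldl (fun l i => l.set i (f i)) xs = (List.range m).map f ++ xs.drop m := by
  intro m
  induction m with
  | zero => intro xs _; simp
  | succ m ih =>
    intro xs hm
    rw [List.range_succ, List.foldl_append, List.foldl_cons, List.foldl_nil,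
        ih xs (by omega), List.map_append, List.set_append]
    have hlen : ((List.range m).map f).length = m := by simp
    rw [if_neg (by rw [hlen]; omega), hlen, Nat.sub_self,
        List.drop_eq_getElem_cons (show m < xs.length by omega), List.set_cons_zero]
    simp

theorem pv_map_range_getD (xs : List Int) (m : Nat) (h : xs.length = m) :
    (List.range m).map (fun i => xs.getD i 0) = xs := by
  apply List.ext_getElem
  · simp [h]
  · intro i hi hi'
    simp only [List.getElem_map, List.getElem_range]
    rw [List.getD_eq_getElem _ _ (by simp at hi; omega)]

theorem pv_freq_eq (a : List Int) (n div : Int) (idx : List Int) (hn : n = (idx.length : Int)) :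
    countSortFreq a n div idx
      = idx.foldl (fun f j => f.set (pvKey a div j).toNat (f.getD (pvKey a div j).toNat 0 + 1))
          (List.replicate 10 (0:Int)) := by
  unfold countSortFreq
  rw [hn]
  exact PySem.List.foldl_pyRange_zero_pyGetD' idx 0
    (fun f j => f.set (pvKey a div j).toNat (f.getD (pvKey a div j).toNat 0 + 1)) (List.replicate 10 (0:Int))

theorem pv_place_eq (a : List Int) (n div : Int) (idx position : List Int) (hn : n = (idx.length : Int)) :
    countSortPlace a n div idx position
      = idx.foldl (fun (s : List Int × List Int) j =>
            (s.1.set ((s.2.getD (pvKey a div j).toNat 0).toNat) j,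
             s.2.set (pvKey a div j).toNat (s.2.getD (pvKey a div j).toNat 0 + 1)))
          (List.replicate idx.length (0:Int), position) := by
  unfold countSortPlace
  rw [hn]
  have h : ((idx.length : Int)).toNat = idx.length := Int.toNat_natCast _
  rw [h]
  exact PySem.List.foldl_pyRange_zero_pyGetD' idx 0
    (fun (s : List Int × List Int) j =>
      (s.1.set ((s.2.getD (pvKey a div j).toNat 0).toNat) j,
       s.2.set (pvKey a div j).toNat (s.2.getD (pvKey a div j).toNat 0 + 1)))
    (List.replicate idx.length (0:Int), position)

theorem pv_copyback (final idx : List Int) (hn : final.length = idx.length) :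
    (PySem.List.pyRange 0 (idx.length : Int) 1).foldl
        (fun l i => l.set i.toNat (final.getD i.toNat 0)) idx = final := by
  rw [PySem.List.pyRange_zero, List.foldl_map]
  have h : ∀ (l : List Int) (i : Nat), l.set ((i : Int)).toNat (final.getD ((i : Int)).toNat 0)
      = l.set i (final.getD i 0) := by intro l i; rw [Int.toNat_natCast]
  simp only [h, Int.toNat_natCast]
  rw [pv_foldl_set_range (fun i => final.getD i 0) idx.length idx (le_refl _)]
  rw [pv_map_range_getD final idx.length hn]
  simp

-- counting sort with prefix-sum positions = stable bucket concatenation by digit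
theorem pv_countSort (a : List Int) (n pos : Int) (idx : List Int) (hn : n = (idx.length : Int)) :
    countSort a n pos idx
      = pvDs10.flatMap (fun d => idx.filter (fun j => pvKey a ((10:Int) ^ pos.toNat) j == d)) := by
  set div : Int := (10:Int) ^ pos.toNat with hdiv
  have hk : ∀ j : Int, 0 ≤ pvKey a div j ∧ pvKey a div j < 10 :=
    fun j => ⟨PySem.Int.mod_nonneg _ (by norm_num), PySem.Int.mod_lt _ (by norm_num)⟩
  set k := pvKey a div with hkdef
  set tot : Int → Nat := fun d => idx.countP (fun x => k x == d) with htot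
  have hfreq := pv_freq k hk idx (List.replicate 10 (0:Int)) (by simp)
  have hfreqD : ∀ d : Nat, d < 10 →
      (countSortFreq a n div idx).getD d 0 = (tot d : Int) := by
    intro d hd
    rw [pv_freq_eq a n div idx hn, hfreq.2 d hd, htot]
    have hz : (List.replicate 10 (0:Int)).getD d 0 = 0 := by
      rw [List.getD_eq_getElem _ _ (by rw [List.length_replicate]; omega), List.getElem_replicate]
    rw [hz]
    simp
  have hposition : countSortPosition (countSortFreq a n div idx) = pvPos k tot [] := by
    unfold countSortPosition
    exact pv_position_crunch k tot _ hfreqD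
  have hsum : (pvDs10.map tot).sum = idx.length := by
    apply pv_sum_countP k pvDs10 (by rw [pvDs10]; exact PySem.List.nodup_pyRange_one 0 10)
    intro x _
    rw [pvDs10, PySem.List.mem_pyRange_one]
    exact (hk x)
  have hinit : List.replicate idx.length (0:Int) = pvChunks k tot [] pvDs10 := by
    rw [pv_chunks_nil, hsum]
  have hplace : countSortPlace a n div idx (countSortPosition (countSortFreq a n div idx))
      = (pvChunks k tot idx pvDs10, pvPos k tot idx) := by
    rw [pv_place_eq a n div idx _ hn, hposition, hinit]
    have := pv_scatter k hk tot idx [] (by intro d; simp [htot])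
    simpa using this
  show (PySem.List.pyRange 0 n 1).foldl
      (fun l i => l.set i.toNat
        ((countSortPlace a n div idx (countSortPosition (countSortFreq a n div idx))).1.getD i.toNat 0)) idx
    = _
  rw [hplace]
  have hfull : pvChunks k tot idx pvDs10
      = pvDs10.flatMap (fun d => idx.filter (fun j => k j == d)) := by
    rw [htot]
    exact pv_chunks_full k idx pvDs10
  have hlenfull : (pvChunks k tot idx pvDs10).length = idx.length := by
    rw [hfull, List.length_flatMap]
    have hf : ∀ d, (idx.filter (fun j => k j == d)).length = idx.countP (fun j => k j == d) := by
      intro d; rw [← List.countP_eq_length_filter]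
    calc (pvDs10.map (fun d => (idx.filter (fun j => k j == d)).length)).sum
        = (pvDs10.map tot).sum := by
          apply congrArg
          apply List.map_congr_left
          intro d _
          rw [hf d, htot]
      _ = idx.length := hsum
  rw [hn]
  exact (pv_copyback _ idx hlenfull).trans hfull

theorem pv_range_shift (s M : Int) (hM : 0 ≤ M) :
    PySem.List.pyRange s (s + M) 1 = (PySem.List.pyRange 0 M 1).map (fun v => s + v) := by
  rw [PySem.List.pyRange_one s (s + M), PySem.List.pyRange_one 0 M]
  rw [List.map_map]
  have h1 : s + M - s = M := by ring
  have h2 : M - (0:Int) = M := by ring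
  rw [h1, h2]
  apply List.map_congr_left
  intro x _
  simp

theorem pv_range_decomp (c : Nat) (M : Int) (hM : 0 < M) :
    PySem.List.pyRange 0 ((c : Int) * M) 1
      = (PySem.List.pyRange 0 (c : Int) 1).flatMap (fun d => (PySem.List.pyRange 0 M 1).map (fun v => d * M + v)) := by
  induction c with
  | zero => simp [PySem.List.pyRange_one_eq_nil]
  | succ c ih =>
    have hc1 : ((c + 1 : Nat) : Int) = (c : Int) + 1 := by push_cast; ring
    have hc2 : ((c + 1 : Nat) : Int) * M = (c : Int) * M + M := by push_cast; ring
    rw [hc2, hc1,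
        PySem.List.pyRange_one_append 0 ((c : Int) * M) ((c : Int) * M + M) (by positivity) (by omega),
        PySem.List.pyRange_one_succ_right (by positivity), List.flatMap_append, ih]
    congr 1
    rw [pv_range_shift _ _ (le_of_lt hM)]
    simp only [List.flatMap_cons, List.flatMap_nil, List.append_nil]

theorem pv_buck_mul (g : Int → Int) (M : Int) (hM : 0 < M) (t : List Int) :
    pvDs10.flatMap (fun d =>
        ((PySem.List.pyRange 0 M 1).flatMap (fun v => t.filter (fun j => PySem.Int.mod (g j) M == v))).filter
          (fun j => PySem.Int.mod (PySem.Int.floordiv (g j) M) 10 == d))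
      = (PySem.List.pyRange 0 (10 * M) 1).flatMap (fun v => t.filter (fun j => PySem.Int.mod (g j) (10 * M) == v)) := by
  have h10 : (10 : Int) = ((10 : Nat) : Int) := by norm_num
  rw [h10, pv_range_decomp 10 M hM, List.flatMap_assoc]
  rw [show ((10:Nat):Int) = (10:Int) from rfl] at *
  have hds : PySem.List.pyRange 0 (10:Int) 1 = pvDs10 := rfl
  rw [hds]
  apply List.flatMap_congr
  intro d hd
  rw [List.flatMap_map, List.filter_flatMap]
  apply List.flatMap_congr
  intro v hv
  rw [List.filter_filter]
  apply List.filter_congr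
  intro j _
  have hdm := (PySem.List.mem_pyRange_one.mp (by simpa [pvDs10] using hd))
  have hvm := PySem.List.mem_pyRange_one.mp hv
  have hiff := pv_mod_eq_iff (g j) M d v hM hdm.1 hdm.2 hvm.1 hvm.2
  rw [Bool.eq_iff_iff]
  simp only [Bool.and_eq_true, beq_iff_eq]
  exact hiff.symm

theorem pv_buck_length (g : Int → Int) (M : Int) (hM : 0 < M) (t : List Int) :
    ((PySem.List.pyRange 0 M 1).flatMap (fun v => t.filter (fun j => PySem.Int.mod (g j) M == v))).length
      = t.length := by
  rw [List.length_flatMap]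
  have h : ∀ v, (t.filter (fun j => PySem.Int.mod (g j) M == v)).length
      = t.countP (fun j => PySem.Int.mod (g j) M == v) := by
    intro v; rw [← List.countP_eq_length_filter]
  calc ((PySem.List.pyRange 0 M 1).map (fun v => (t.filter (fun j => PySem.Int.mod (g j) M == v)).length)).sum
      = ((PySem.List.pyRange 0 M 1).map (fun v => t.countP (fun j => PySem.Int.mod (g j) M == v))).sum := by
        apply congrArg; exact List.map_congr_left (fun v _ => h v)
    _ = t.length := by
        apply pv_sum_countP (fun j => PySem.Int.mod (g j) M) _ (PySem.List.nodup_pyRange_one 0 M) t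
        intro x _
        rw [PySem.List.mem_pyRange_one]
        exact ⟨PySem.Int.mod_nonneg _ hM, PySem.Int.mod_lt _ hM⟩

theorem pv_buck_one (g : Int → Int) (t : List Int) :
    (PySem.List.pyRange 0 (1:Int) 1).flatMap (fun v => t.filter (fun j => PySem.Int.mod (g j) 1 == v)) = t := by
  have h1 : PySem.List.pyRange 0 (1:Int) 1 = [0] := by decide
  rw [h1]
  simp only [List.flatMap_cons, List.flatMap_nil, List.append_nil]
  have : ∀ j ∈ t, (PySem.Int.mod (g j) 1 == (0:Int)) = true := by
    intro j _
    have h2 := PySem.Int.mod_nonneg (g j) (show (0:Int) < 1 by norm_num)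
    have h3 := PySem.Int.mod_lt (g j) (show (0:Int) < 1 by norm_num)
    simp only [beq_iff_eq]
    omega
  exact List.filter_eq_self.mpr this

theorem pv_passes (a : List Int) (n : Int) (t : List Int) (hn : n = (t.length : Int)) :
    ∀ m : Nat,
      (PySem.List.pyRange 0 (m : Int) 1).foldl (fun idx p => countSort a n p idx) t
        = (PySem.List.pyRange 0 ((10:Int) ^ m) 1).flatMap
            (fun v => t.filter (fun j => PySem.Int.mod (PySem.List.pyGetD a j 0) ((10:Int) ^ m) == v)) := by
  intro m
  induction m with
  | zero =>
    simp only [Nat.cast_zero, pow_zero]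
    rw [PySem.List.pyRange_one_eq_nil (le_refl 0), List.foldl_nil]
    exact (pv_buck_one (fun j => PySem.List.pyGetD a j 0) t).symm
  | succ m ih =>
    have hc : ((m + 1 : Nat) : Int) = (m : Int) + 1 := by push_cast; ring
    rw [hc, PySem.List.pyRange_one_succ_right (by positivity), List.foldl_append,
        List.foldl_cons, List.foldl_nil, ih]
    have hlen : n = (((PySem.List.pyRange 0 ((10:Int) ^ m) 1).flatMap
        (fun v => t.filter (fun j => PySem.Int.mod (PySem.List.pyGetD a j 0) ((10:Int) ^ m) == v))).length : Int) := by
      rw [pv_buck_length (fun j => PySem.List.pyGetD a j 0) _ (by positivity) t]; exact hn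
    rw [pv_countSort a n (m : Int) _ hlen]
    rw [Int.toNat_natCast m]
    simp only [pvKey]
    rw [pv_buck_mul (fun j => PySem.List.pyGetD a j 0) ((10:Int)^m) (by positivity) t]
    rw [show (10:Int) * 10 ^ m = 10 ^ (m + 1) from by rw [pow_succ]; ring]

theorem pv_idx0 (n : Int) (h0 : 0 ≤ n) :
    (PySem.List.pyRange 0 n 1).foldl (fun idx i => idx.set i.toNat i) (List.replicate n.toNat (0:Int))
      = PySem.List.pyRange 0 n 1 := by
  rw [PySem.List.pyRange_zero, List.foldl_map]
  simp only [Int.toNat_natCast]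
  rw [pv_foldl_set_range (fun i => (i : Int)) n.toNat (List.replicate n.toNat 0) (by simp)]
  simp

theorem pv_maxele (a : List Int) (n : Int) :
    (PySem.List.max? (1 :: (PySem.List.pyRange 0 n 1).map (fun i => PySem.List.pyGetD a i 0)) (fun y => y)).getD 1
      = (PySem.List.pyRange 0 n 1).foldl (fun m i => max m (PySem.List.pyGetD a i 0)) 1 := by
  rw [PySem.List.max?_id_cons, Option.getD_some, List.foldl_map]

theorem pv_main (a : List Int) (n : Int) : radiax_sort a n = radiax_sort_alt a n := by
  by_cases h0 : 0 ≤ n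
  · simp only [radiax_sort, radiax_sort_alt]
    rw [pv_maxele a n]
    rw [pv_idx0 n h0]
    have hn' : n = ((PySem.List.pyRange 0 n 1).length : Int) := by
      rw [PySem.List.length_pyRange_one]; omega
    set E : Int := (PySem.List.pyRange 0 n 1).foldl (fun m i => max m (PySem.List.pyGetD a i 0)) 1 with hE
    have hcast : ((pyLog10 E.toNat : Nat) : Int) + 1 = ((pyLog10 E.toNat + 1 : Nat) : Int) := by push_cast; ring
    rw [hcast]
    rw [pv_passes a n _ hn' (pyLog10 E.toNat + 1)]
    rw [pv_sorted_eq_buckets (fun i => PySem.Int.mod (PySem.List.pyGetD a i 0) ((10:Int) ^ (pyLog10 E.toNat + 1)))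
          (PySem.List.pyRange 0 ((10:Int) ^ (pyLog10 E.toNat + 1)) 1)
          (PySem.List.pairwise_lt_pyRange_one 0 _)
          (PySem.List.pyRange 0 n 1)
          (by
            intro x _
            rw [PySem.List.mem_pyRange_one]
            exact ⟨PySem.Int.mod_nonneg _ (by positivity), PySem.Int.mod_lt _ (by positivity)⟩)]
  · have hneg : n < 0 := by omega
    have hnil : PySem.List.pyRange 0 n 1 = [] := PySem.List.pyRange_one_eq_nil (by omega)
    have hrep : List.replicate n.toNat (0:Int) = [] := by
      rw [Int.toNat_of_nonpos (by omega)]; rfl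
    have hcs : ∀ p, countSort a n p [] = [] := by
      intro p
      simp only [countSort, hnil, List.foldl_nil]
    have hfold : ∀ l : List Int, l.foldl (fun idx p => countSort a n p idx) [] = [] := by
      intro l
      induction l with
      | nil => rfl
      | cons x l ih => rw [List.foldl_cons, hcs x]; exact ih
    simp only [radiax_sort, radiax_sort_alt, hnil, hrep, List.foldl_nil, List.map_nil]
    rw [hfold]
    rfl

-- ===== VERDICT (by name: the statement is the Claim_ definition above) =====
theorem radiax_sort_spec : Claim_equal_radiax_sort := by
  intro a n _ _
  exact pv_main a n
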